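-- pv_equiv track=rewrite | github.com/adesupraptolaia/Challange_week1 | Problem 3/3-target-terdekat.py | targetTerdekat
-- ===== SOURCE A (Python) =====
-- def targetTerdekat(arr):
--     len_arr = len(arr)
--     #list tempat indeks o dan x berada dimana aja
--     index_o = []
--     index_x = []
--     #memasukkan indeks o dan x kedalam list
--     for i in range(len_arr):
--         if 'o' == arr[i]:
--             index_o.append(i)
--         if 'x' == arr[i]:
--             index_x.append(i)
--
--     # tentukan jarak terpendek
--     if index_o == [] or index_x == []:
--         return 0
--     else:
--         jarak = abs(index_o[0] - index_x[0])
--         for i in index_o: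
--             for k in index_x:
--                 if jarak > abs(i-k):
--                     jarak = abs(i-k)
--     return jarak
-- ===== SOURCE B (Python) =====
-- def targetTerdekat(arr):
--     # One pass: keep the index of the last seen 'o' and last seen 'x';
--     # the global minimum distance is always realised against the nearest
--     # previous opposite symbol.
--     last_o = None
--     last_x = None
--     best = None
--     for i, v in enumerate(arr):
--         if v == 'o':
--             last_o = i
--             if last_x is not None:
--                 d = i - last_x
--                 if best is None or d < best:
--                     best = d
--         elif v == 'x':
--             last_x = i
--             if last_o is not None:
--                 d = i - last_o
--                 if best is None or d < best:
--                     best = d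
--     return 0 if best is None else best
-- ===== Notes on version B (the rewrite author's own statement) =====
-- stated objective: alternative
-- what changed: replaced the quadratic scan over all ('o' index, 'x' index) pairs by a single pass that tracks the last seen 'o' and 'x' indices and the running minimum gap
import Mathlib
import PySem

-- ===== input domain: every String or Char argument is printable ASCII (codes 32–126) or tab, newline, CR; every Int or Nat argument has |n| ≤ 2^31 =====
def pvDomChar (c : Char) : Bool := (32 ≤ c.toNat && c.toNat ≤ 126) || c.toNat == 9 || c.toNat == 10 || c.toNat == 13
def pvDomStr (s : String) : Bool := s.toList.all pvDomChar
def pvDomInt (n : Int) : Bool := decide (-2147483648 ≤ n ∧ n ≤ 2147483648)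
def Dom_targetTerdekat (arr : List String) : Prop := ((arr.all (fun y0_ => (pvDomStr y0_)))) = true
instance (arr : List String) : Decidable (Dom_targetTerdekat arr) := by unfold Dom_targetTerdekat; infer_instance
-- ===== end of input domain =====

-- B replaces A's all-pairs scan by a single pass tracking the last seen 'o'/'x' index (objective: alternative).

-- ===== PORT A =====
-- Literal port of A: build index_o / index_x in one indexed loop, then the nested
-- minimum loop seeded with |index_o[0] - index_x[0]| (headD is exact: the branch
-- guarantees both lists are nonempty, so [0] is the head).
def targetTerdekat (arr : List String) : Int :=
  let lenArr : Int := (arr.length : Int)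
  let p := (PySem.List.pyRange 0 lenArr 1).foldl
      (fun (p : List Int × List Int) i =>
        let p1 := if PySem.List.pyGetD arr i "" = "o" then (p.1 ++ [i], p.2) else p
        if PySem.List.pyGetD arr i "" = "x" then (p1.1, p1.2 ++ [i]) else p1)
      ([], [])
  let index_o := p.1
  let index_x := p.2
  if index_o = [] ∨ index_x = [] then 0
  else
    let jarak := |index_o.headD 0 - index_x.headD 0|
    index_o.foldl
      (fun jar i => index_x.foldl (fun jar k => if jar > |i - k| then |i - k| else jar) jar)
      jarak

-- ===== PORT B =====
-- 'None'-aware minimum: best = d if best is None or d < best  (i.e. min, kept in Option)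
def omin : Option Int → Option Int → Option Int
  | none, y => y
  | some a, none => some a
  | some a, some b => some (min a b)

-- the enumerate loop of Source B, state (last_o, last_x, best), index carried explicitly
def loopB : List String → Int → Option Int → Option Int → Option Int → Option Int
  | [], _, _, _, best => best
  | s :: r, i, lo, lx, best =>
    if s = "o" then
      loopB r (i + 1) (some i) lx
        (match lx with
         | some b => omin best (some (i - b))
         | none => best)
    else if s = "x" then
      loopB r (i + 1) lo (some i)
        (match lo with
         | some a => omin best (some (i - a))
         | none => best)
    else loopB r (i + 1) lo lx best

def targetTerdekat_alt (arr : List String) : Int :=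
  match loopB arr 0 none none none with
  | none => 0
  | some m => m

-- ===== PRECONDITION & SPEC =====
def Spec_targetTerdekat (arr : List String) (out : Int) : Prop := out = targetTerdekat_alt arr
instance (arr : List String) (out : Int) : Decidable (Spec_targetTerdekat arr out) := by unfold Spec_targetTerdekat; infer_instance

-- ===== CLAIM (what is proved, stated in full; the proofs are below) =====
def Claim_equal_targetTerdekat : Prop := ∀ (arr : List String), Dom_targetTerdekat arr → Spec_targetTerdekat arr (targetTerdekat arr)

-- ===== LEMMAS AND PROOFS =====

-- indices (from i) of the elements of the list equal to c
def idxs (c : String) : List String → Int → List Int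
  | [], _ => []
  | s :: r, i => (if s = c then [i] else []) ++ idxs c r (i + 1)

-- all pairwise distances |o - x|
def cross (os xs : List Int) : List Int :=
  os.flatMap (fun o => xs.map (fun x => |o - x|))

-- minimum of a list as an Option
def mfold (l : List Int) : Option Int := l.foldl (fun acc x => omin acc (some x)) none

theorem omin_none_right (x : Option Int) : omin x none = x := by
  cases x <;> rfl

theorem omin_assoc (x y z : Option Int) : omin (omin x y) z = omin x (omin y z) := by
  cases x <;> cases y <;> cases z <;> simp [omin, min_assoc]

theorem omin_comm (x y : Option Int) : omin x y = omin y x := by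
  cases x <;> cases y <;> simp [omin, min_comm]

theorem omin_left_comm (x y z : Option Int) : omin x (omin y z) = omin y (omin x z) := by
  cases x <;> cases y <;> cases z <;> simp [omin, min_left_comm, min_comm]

theorem mfold_acc (l : List Int) : ∀ a : Option Int,
    l.foldl (fun acc x => omin acc (some x)) a = omin a (mfold l) := by
  induction l with
  | nil => intro a; simp [mfold, omin_none_right]
  | cons y t ih =>
      intro a
      show (t.foldl _ (omin a (some y))) = _
      rw [ih (omin a (some y))]
      conv_rhs => rw [mfold, List.foldl_cons, ih (omin none (some y))]
      show omin (omin a (some y)) (mfold t) = omin a (omin (omin none (some y)) (mfold t))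
      rw [omin_assoc]; rfl

theorem mfold_cons (y : Int) (l : List Int) : mfold (y :: l) = omin (some y) (mfold l) := by
  rw [mfold, List.foldl_cons, mfold_acc]; rfl

theorem mfold_append (l₁ l₂ : List Int) : mfold (l₁ ++ l₂) = omin (mfold l₁) (mfold l₂) := by
  rw [mfold, List.foldl_append, mfold_acc]; rfl

theorem mfold_le_of_mem {z : Int} {l : List Int} (h : z ∈ l) :
    ∃ m, mfold l = some m ∧ m ≤ z := by
  induction l with
  | nil => cases h
  | cons y t ih =>
      rw [mfold_cons]
      rcases List.mem_cons.1 h with rfl | hz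
      · cases hm : mfold t with
        | none => exact ⟨z, rfl, le_refl z⟩
        | some m => exact ⟨min z m, rfl, min_le_left _ _⟩
      · obtain ⟨m, hm, hle⟩ := ih hz
        rw [hm]
        exact ⟨min y m, rfl, le_trans (min_le_right _ _) hle⟩

-- dominated candidates do not change the minimum
theorem absorb (u : Option Int) (l l₂ : List Int)
    (h : ∀ y ∈ l, (∃ m, u = some m ∧ m ≤ y) ∨ ∃ z ∈ l₂, z ≤ y) :
    omin u (omin (mfold l) (mfold l₂)) = omin u (mfold l₂) := by
  induction l with
  | nil => rfl
  | cons y t ih =>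
      rw [mfold_cons, omin_assoc]
      rcases h y (List.mem_cons_self) with ⟨m, hu, hm⟩ | ⟨z, hz, hle⟩
      · have h1 : omin u (some y) = u := by rw [hu]; simp [omin, min_eq_left hm]
        rw [← omin_assoc, h1]
        exact ih (fun y hy => h y (List.mem_cons_of_mem _ hy))
      · obtain ⟨m₂, hm₂, hle₂⟩ := mfold_le_of_mem hz
        have h1 : omin (some y) (mfold l₂) = mfold l₂ := by
          rw [hm₂]; simp [omin, min_eq_right (le_trans hle₂ hle)]
        have h2 : omin (some y) (omin (mfold t) (mfold l₂)) = omin (mfold t) (mfold l₂) := by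
          rw [omin_left_comm, h1]
        rw [h2]
        exact ih (fun y hy => h y (List.mem_cons_of_mem _ hy))

theorem mem_cross {z : Int} {os xs : List Int} :
    z ∈ cross os xs ↔ ∃ o ∈ os, ∃ x ∈ xs, z = |o - x| := by
  simp only [cross, List.mem_flatMap, List.mem_map]
  constructor
  · rintro ⟨o, ho, x, hx, rfl⟩; exact ⟨o, ho, x, hx, rfl⟩
  · rintro ⟨o, ho, x, hx, rfl⟩; exact ⟨o, ho, x, hx, rfl⟩

theorem cross_cons (a : Int) (os xs : List Int) :
    cross (a :: os) xs = xs.map (fun x => |a - x|) ++ cross os xs := rfl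

theorem mfold_cross_cons_right (os : List Int) (b : Int) (xs : List Int) :
    mfold (cross os (b :: xs)) =
      omin (mfold (os.map (fun o => |o - b|))) (mfold (cross os xs)) := by
  induction os with
  | nil => simp [cross, mfold, omin]
  | cons a os ih =>
      rw [cross_cons, List.map_cons, mfold_append, List.map_cons, mfold_cons, mfold_cons,
        cross_cons, mfold_append, ih]
      rw [omin_assoc, omin_assoc, ← omin_assoc (mfold (List.map (fun x => |a - x|) xs)),
        omin_comm (mfold (List.map (fun x => |a - x|) xs)) (mfold (List.map (fun o => |o - b|) os)),
        omin_assoc]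

theorem idxs_lb (c : String) : ∀ (r : List String) (i : Int), ∀ x ∈ idxs c r i, i ≤ x := by
  intro r
  induction r with
  | nil => intro i x hx; cases hx
  | cons s t ih =>
      intro i x hx
      rcases List.mem_append.1 hx with h1 | h2
      · split at h1
        · rcases List.mem_singleton.1 h1 with rfl; exact le_refl x
        · cases h1
      · exact le_trans (by omega) (ih (i + 1) x h2)

theorem omin_absorb_right {v : Int} {l : List Int} (h : ∃ z ∈ l, z ≤ v) :
    omin (some v) (mfold l) = mfold l := by
  obtain ⟨z, hz, hle⟩ := h
  obtain ⟨m, hm, hml⟩ := mfold_le_of_mem hz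
  rw [hm]; simp [omin, min_eq_right (le_trans hml hle)]

-- main invariant of B's loop
theorem loopB_spec : ∀ (r : List String) (i : Int) (lo lx best : Option Int),
    (∀ a, lo = some a → a < i) →
    (∀ b, lx = some b → b < i) →
    (∀ a b, lo = some a → lx = some b → ∃ m, best = some m ∧ m ≤ |a - b|) →
    loopB r i lo lx best =
      omin best (mfold (cross (lo.toList ++ idxs "o" r i) (lx.toList ++ idxs "x" r i))) := by
  intro r
  induction r with
  | nil =>
      intro i lo lx best hlo hlx hb
      cases lo with
      | none => simp [loopB, idxs, cross, mfold, omin_none_right]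
      | some a =>
          cases lx with
          | none => simp [loopB, idxs, cross, mfold, omin_none_right]
          | some b =>
              obtain ⟨m, hm, hml⟩ := hb a b rfl rfl
              simp [loopB, idxs, cross, mfold, hm, omin, min_eq_left hml]
  | cons s r ih =>
      intro i lo lx best hlo hlx hb
      have hXlb : ∀ x ∈ idxs "x" r (i + 1), i < x := fun x hx => by
        have := idxs_lb "x" r (i + 1) x hx; omega
      have hOlb : ∀ o ∈ idxs "o" r (i + 1), i < o := fun o ho => by
        have := idxs_lb "o" r (i + 1) o ho; omega
      by_cases hso : s = "o"
      · have hsx : s ≠ "x" := by rw [hso]; decide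
        have hIo : idxs "o" (s :: r) i = i :: idxs "o" r (i + 1) := by
          simp [idxs, hso]
        have hIx : idxs "x" (s :: r) i = idxs "x" r (i + 1) := by
          simp [idxs, hsx]
        rw [hIo, hIx]
        simp only [loopB, if_pos hso]
        cases lx with
        | none =>
            rw [ih (i + 1) (some i) none best
              (by intro a h; injection h with h; omega)
              (by intro b h; cases h) (by intro a b _ h; cases h)]
            simp only [Option.toList_some, Option.toList_none, List.singleton_append,
              List.nil_append]
            cases lo with
            | none => rfl
            | some a =>
                have ha : a < i := hlo a rfl
                simp only [Option.toList_some, List.cons_append]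
                conv_rhs => rw [cross_cons, mfold_append]
                rw [absorb best _ _ ?dom]
                case dom =>
                  intro y hy
                  obtain ⟨x, hx, rfl⟩ := List.mem_map.1 hy
                  refine Or.inr ⟨|i - x|, mem_cross.2 ⟨i, List.mem_cons_self, x, hx, rfl⟩, ?_⟩
                  have := hXlb x hx
                  rw [abs_of_nonpos (by omega), abs_of_nonpos (by omega)]; omega
                exact rfl
        | some b =>
            have hbi : b < i := hlx b rfl
            rw [ih (i + 1) (some i) (some b) (omin best (some (i - b)))
              (by intro a h; injection h with h; omega)
              (by intro b' h; injection h with h; omega) ?h2]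
            case h2 =>
              intro a' b' ha' hb'
              injection ha' with ha'; injection hb' with hb'
              subst ha'; subst hb'
              rw [abs_of_nonneg (by omega)]
              cases best with
              | none => exact ⟨i - b, rfl, le_refl _⟩
              | some m => exact ⟨min m (i - b), rfl, min_le_right _ _⟩
            simp only [Option.toList_some, List.singleton_append]
            have habs : omin (some (i - b))
                (mfold (cross (i :: idxs "o" r (i + 1)) (b :: idxs "x" r (i + 1))))
                = mfold (cross (i :: idxs "o" r (i + 1)) (b :: idxs "x" r (i + 1))) :=
              omin_absorb_right ⟨|i - b|,
                mem_cross.2 ⟨i, List.mem_cons_self, b, List.mem_cons_self, rfl⟩,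
                by rw [abs_of_nonneg (by omega)]⟩
            rw [omin_assoc, habs]
            cases lo with
            | none => rfl
            | some a =>
                have ha : a < i := hlo a rfl
                simp only [Option.toList_some, List.cons_append]
                conv_rhs => rw [cross_cons, mfold_append]
                rw [absorb best _ _ ?dom2]
                case dom2 =>
                  intro y hy
                  obtain ⟨x, hx, rfl⟩ := List.mem_map.1 hy
                  rcases List.mem_cons.1 hx with rfl | hx'
                  · exact Or.inl (hb a x rfl rfl)
                  · refine Or.inr ⟨|i - x|, mem_cross.2 ⟨i, List.mem_cons_self, x,
                      List.mem_cons_of_mem _ hx', rfl⟩, ?_⟩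
                    have := hXlb x hx'
                    rw [abs_of_nonpos (by omega), abs_of_nonpos (by omega)]; omega
                exact rfl
      · by_cases hsx : s = "x"
        · have hIo : idxs "o" (s :: r) i = idxs "o" r (i + 1) := by simp [idxs, hso]
          have hIx : idxs "x" (s :: r) i = i :: idxs "x" r (i + 1) := by simp [idxs, hsx]
          rw [hIo, hIx]
          simp only [loopB, if_neg hso, if_pos hsx]
          cases lo with
          | none =>
              rw [ih (i + 1) none (some i) best
                (by intro a h; cases h)
                (by intro b h; injection h with h; omega)
                (by intro a b h; cases h)]
              simp only [Option.toList_some, Option.toList_none, List.singleton_append,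
                List.nil_append]
              cases lx with
              | none => rfl
              | some b =>
                  have hbi : b < i := hlx b rfl
                  simp only [Option.toList_some, List.cons_append]
                  conv_rhs => rw [mfold_cross_cons_right]
                  rw [absorb best _ _ ?dom3]
                  case dom3 =>
                    intro y hy
                    obtain ⟨o, ho, rfl⟩ := List.mem_map.1 hy
                    refine Or.inr ⟨|o - i|, mem_cross.2 ⟨o, ho, i, List.mem_cons_self, rfl⟩, ?_⟩
                    have := hOlb o ho
                    rw [abs_of_nonneg (by omega), abs_of_nonneg (by omega)]; omega
                  exact rfl
          | some a =>
              have ha : a < i := hlo a rfl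
              rw [ih (i + 1) (some a) (some i) (omin best (some (i - a)))
                (by intro a' h; injection h with h; omega)
                (by intro b h; injection h with h; omega) ?h4]
              case h4 =>
                intro a' b' ha' hb'
                injection ha' with ha'; injection hb' with hb'
                subst ha'; subst hb'
                rw [abs_of_nonpos (by omega)]
                cases best with
                | none => exact ⟨i - a, rfl, by omega⟩
                | some m =>
                    refine ⟨min m (i - a), rfl, ?_⟩
                    have := min_le_right m (i - a); omega
              simp only [Option.toList_some, List.singleton_append]
              have habs : omin (some (i - a))
                  (mfold (cross (a :: idxs "o" r (i + 1)) (i :: idxs "x" r (i + 1))))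
                  = mfold (cross (a :: idxs "o" r (i + 1)) (i :: idxs "x" r (i + 1))) :=
                omin_absorb_right ⟨|a - i|,
                  mem_cross.2 ⟨a, List.mem_cons_self, i, List.mem_cons_self, rfl⟩,
                  by rw [abs_of_nonpos (by omega)]; omega⟩
              rw [omin_assoc, habs]
              cases lx with
              | none => rfl
              | some b =>
                  have hbi : b < i := hlx b rfl
                  simp only [Option.toList_some, List.cons_append]
                  conv_rhs => rw [mfold_cross_cons_right]
                  rw [absorb best _ _ ?dom4]
                  case dom4 =>
                    intro y hy
                    obtain ⟨o, ho, rfl⟩ := List.mem_map.1 hy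
                    rcases List.mem_cons.1 ho with rfl | ho'
                    · exact Or.inl (hb o b rfl rfl)
                    · refine Or.inr ⟨|o - i|, mem_cross.2 ⟨o, List.mem_cons_of_mem _ ho', i,
                        List.mem_cons_self, rfl⟩, ?_⟩
                      have := hOlb o ho'
                      rw [abs_of_nonneg (by omega), abs_of_nonneg (by omega)]; omega
                  exact rfl
        · have hIo : idxs "o" (s :: r) i = idxs "o" r (i + 1) := by simp [idxs, hso]
          have hIx : idxs "x" (s :: r) i = idxs "x" r (i + 1) := by simp [idxs, hsx]
          rw [hIo, hIx]
          simp only [loopB, if_neg hso, if_neg hsx]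
          exact ih (i + 1) lo lx best
            (fun a h => by have := hlo a h; omega)
            (fun b h => by have := hlx b h; omega) hb

theorem alt_eq (arr : List String) :
    targetTerdekat_alt arr =
      match mfold (cross (idxs "o" arr 0) (idxs "x" arr 0)) with
      | none => 0
      | some m => m := by
  unfold targetTerdekat_alt
  rw [loopB_spec arr 0 none none none
    (fun a h => by cases h) (fun b h => by cases h) (fun a b h => by cases h)]
  rfl

-- A's scan over range(len(arr)) keeps exactly the indices whose element is c
theorem filt (c : String) (full : List String) : ∀ (n : Nat) (a : Int), 0 ≤ a →
    a.toNat + n = full.length →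
    (PySem.List.pyRange a (full.length : Int) 1).filter
        (fun j => decide (PySem.List.pyGetD full j "" = c))
      = idxs c (full.drop a.toNat) a := by
  intro n
  induction n with
  | zero =>
      intro a h0 hlen
      have ha : (full.length : Int) ≤ a := by omega
      rw [PySem.List.pyRange_one_eq_nil ha, List.drop_of_length_le (by omega)]
      rfl
  | succ n ih =>
      intro a h0 hlen
      have halt : a < (full.length : Int) := by omega
      have hnat : a.toNat < full.length := by omega
      rw [PySem.List.pyRange_one_cons halt, List.filter_cons]
      have hget : PySem.List.pyGetD full a "" = full[a.toNat] :=
        PySem.List.pyGetD_eq_getElem full "" h0 halt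
      have hdrop : full.drop a.toNat = full[a.toNat] :: full.drop (a.toNat + 1) :=
        (List.getElem_cons_drop hnat).symm
      have hih := ih (a + 1) (by omega) (by omega)
      have htn : (a + 1).toNat = a.toNat + 1 := by omega
      rw [htn] at hih
      rw [hdrop]
      show _ = (if full[a.toNat] = c then [a] else []) ++ idxs c (full.drop (a.toNat + 1)) (a + 1)
      by_cases hc : full[a.toNat] = c
      · rw [if_pos hc]
        rw [if_pos (by rw [hget, hc]; simp), hih]
        rfl
      · rw [if_neg hc]
        rw [if_neg (by simp [hget, hc]), hih]
        rfl

-- A side: the index-building loop builds exactly idxs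
theorem a_indices (arr : List String) :
    ((PySem.List.pyRange 0 (arr.length : Int) 1).foldl
      (fun (p : List Int × List Int) i =>
        let p1 := if PySem.List.pyGetD arr i "" = "o" then (p.1 ++ [i], p.2) else p
        if PySem.List.pyGetD arr i "" = "x" then (p1.1, p1.2 ++ [i]) else p1)
      ([], [])) = (idxs "o" arr 0, idxs "x" arr 0) := by
  have hbody : (fun (p : List Int × List Int) (i : Int) =>
        let p1 := if PySem.List.pyGetD arr i "" = "o" then (p.1 ++ [i], p.2) else p
        if PySem.List.pyGetD arr i "" = "x" then (p1.1, p1.2 ++ [i]) else p1)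
      = (fun (p : List Int × List Int) (i : Int) =>
        (if PySem.List.pyGetD arr i "" = "o" then p.1 ++ [i] else p.1,
         if PySem.List.pyGetD arr i "" = "x" then p.2 ++ [i] else p.2)) := by
    funext p i
    by_cases h1 : PySem.List.pyGetD arr i "" = "o" <;>
      by_cases h2 : PySem.List.pyGetD arr i "" = "x" <;>
        simp [h1, h2]
  rw [hbody, PySem.List.foldl_prod_mk
      (fun (l : List Int) (i : Int) => if PySem.List.pyGetD arr i "" = "o" then l ++ [i] else l)
      (fun (l : List Int) (i : Int) => if PySem.List.pyGetD arr i "" = "x" then l ++ [i] else l),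
    PySem.List.foldl_append_ite, PySem.List.foldl_append_ite]
  have h0 : ((0 : Int)).toNat = 0 := rfl
  have ho := filt "o" arr arr.length 0 (le_refl 0) (by simp)
  have hx := filt "x" arr arr.length 0 (le_refl 0) (by simp)
  rw [h0, List.drop_zero] at ho hx
  simp only [List.nil_append, List.map_id']
  rw [ho, hx]

theorem foldl_min_flat (os xs : List Int) (j : Int) :
    os.foldl (fun jar o => xs.foldl (fun jar x => if jar > |o - x| then |o - x| else jar) jar) j
      = (cross os xs).foldl min j := by
  induction os generalizing j with
  | nil => rfl
  | cons o os ih =>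
      show os.foldl _ (xs.foldl _ j) = _
      rw [cross_cons, List.foldl_append, ih]
      congr 1
      have hbody : (fun (jar x : Int) => if jar > |o - x| then |o - x| else jar)
          = fun jar x => min jar |o - x| := by
        funext jar x; split <;> omega
      rw [hbody, List.foldl_map]

theorem mfold_nonempty (h : Int) (t : List Int) : mfold (h :: t) = some (t.foldl min h) := by
  induction t generalizing h with
  | nil => rfl
  | cons y t ih =>
      rw [mfold_cons, mfold_cons, ← omin_assoc]
      show omin (some (min h y)) _ = _
      rw [← mfold_cons, ih, List.foldl_cons]

theorem a_eq (arr : List String) :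
    targetTerdekat arr =
      match mfold (cross (idxs "o" arr 0) (idxs "x" arr 0)) with
      | none => 0
      | some m => m := by
  simp only [targetTerdekat]
  rw [a_indices]
  dsimp only
  by_cases ho : idxs "o" arr 0 = []
  · simp [ho, cross, mfold]
  · by_cases hx : idxs "x" arr 0 = []
    · have hc : cross (idxs "o" arr 0) [] = [] := by simp [cross]
      simp [ho, hx, hc, mfold]
    · obtain ⟨o0, os', heq⟩ := List.exists_cons_of_ne_nil ho
      obtain ⟨x0, xs', hxeq⟩ := List.exists_cons_of_ne_nil hx
      rw [heq, hxeq, List.headD_cons, List.headD_cons, foldl_min_flat]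
      have hc : cross (o0 :: os') (x0 :: xs')
          = |o0 - x0| :: (xs'.map (fun x => |o0 - x|) ++ cross os' (x0 :: xs')) := rfl
      rw [hc, List.foldl_cons, min_self, mfold_nonempty]
      simp

-- ===== VERDICT (by name: the statement is the Claim_ definition above) =====
theorem targetTerdekat_spec : Claim_equal_targetTerdekat := by
  intro arr _
  unfold Spec_targetTerdekat
  rw [a_eq, alt_eq]
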